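-- pv_equiv track=rewrite | github.com/lucapalazzetti04-alt/MCF | E05/somme.py | sumprod
-- ===== SOURCE A (Python) =====
-- def sumprod(n):
-- 	if n<0:
-- 		raise ValueError("N deve essere >=0")
-- 	somma=0
-- 	prodotto=1
-- 	for i in  range(1, n+1):
-- 		somma += i
-- 		prodotto *= i
-- 	return somma, prodotto
-- ===== SOURCE B (Python) =====
-- import math
--
-- def sumprod(n):
--     if n < 0:
--         raise ValueError("N deve essere >=0")
--     return n * (n + 1) // 2, math.factorial(n)
-- ===== Notes on version B (the rewrite author's own statement) =====
-- stated objective: idiomatic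
-- what changed: Replaced the accumulation loop with Gauss's closed form for the sum and the math.factorial library call for the product.
import Mathlib
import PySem

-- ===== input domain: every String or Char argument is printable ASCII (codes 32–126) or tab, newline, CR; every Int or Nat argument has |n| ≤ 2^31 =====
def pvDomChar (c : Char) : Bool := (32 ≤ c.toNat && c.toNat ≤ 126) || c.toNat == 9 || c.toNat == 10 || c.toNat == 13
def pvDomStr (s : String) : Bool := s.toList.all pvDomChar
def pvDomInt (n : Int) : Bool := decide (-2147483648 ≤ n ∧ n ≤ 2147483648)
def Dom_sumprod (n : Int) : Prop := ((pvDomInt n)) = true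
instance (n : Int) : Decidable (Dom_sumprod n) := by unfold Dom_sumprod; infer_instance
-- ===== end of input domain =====

-- B replaces A's accumulation loop by Gauss's closed form n*(n+1)//2 and math.factorial(n).

-- ===== PORT A =====
-- n < 0: Python raises ValueError — excluded by Pre_sumprod
def sumprod (n : Int) : Int × Int :=
  (PySem.List.pyRange 1 (n + 1) 1).foldl
    (fun st i => (st.1 + i, st.2 * i)) (0, 1)

-- ===== PORT B =====
-- math.factorial(n) ported as Nat.factorial (n ≥ 0 under Pre_)
def sumprod_alt (n : Int) : Int × Int :=
  (PySem.Int.floordiv (n * (n + 1)) 2, (Nat.factorial n.toNat : Int))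

-- ===== PRECONDITION & SPEC =====
-- Pre_ excludes exactly n < 0, where Python A raises ValueError.
def Pre_sumprod (n : Int) : Prop := 0 ≤ n
instance (n : Int) : Decidable (Pre_sumprod n) := by unfold Pre_sumprod; infer_instance
def pvWitness_sumprod : Int := 5

def Spec_sumprod (n : Int) (out : Int × Int) : Prop := out = sumprod_alt n
instance (n : Int) (out : Int × Int) : Decidable (Spec_sumprod n out) := by unfold Spec_sumprod; infer_instance

-- ===== CLAIM (what is proved, stated in full; the proofs are below) =====
def Claim_equal_sumprod : Prop := ∀ (n : Int), Dom_sumprod n → Pre_sumprod n → Spec_sumprod n (sumprod n)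

-- ===== LEMMAS AND PROOFS =====

theorem sumprod_nat (m : Nat) :
    (PySem.List.pyRange 1 ((m : Int) + 1) 1).foldl
      (fun st i => (st.1 + i, st.2 * i)) ((0 : Int), (1 : Int))
    = (PySem.Int.floordiv ((m : Int) * ((m : Int) + 1)) 2, (Nat.factorial m : Int)) := by
  induction m with
  | zero => decide
  | succ k ih =>
    have hsplit : PySem.List.pyRange 1 (((k + 1 : Nat) : Int) + 1) 1
        = PySem.List.pyRange 1 ((k : Int) + 1) 1 ++ [(k : Int) + 1] := by
      push_cast
      rw [PySem.List.pyRange_one_succ_right (show (1:Int) ≤ (k:Int)+1 by omega)]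
    rw [hsplit, List.foldl_append, ih]
    simp only [List.foldl_cons, List.foldl_nil]
    rw [Prod.mk.injEq]
    refine ⟨?_, ?_⟩
    · have h2 : 0 < (2 : Int) := by omega
      rw [PySem.Int.floordiv_eq_ediv_of_pos h2, PySem.Int.floordiv_eq_ediv_of_pos h2]
      have e : ((k + 1 : Nat) : Int) * (((k + 1 : Nat) : Int) + 1)
          = (k : Int) * ((k : Int) + 1) + ((k : Int) + 1) * 2 := by push_cast; ring
      rw [e, Int.add_mul_ediv_right _ _ (by omega)]
    · push_cast [Nat.factorial_succ]; ring

theorem sumprod_spec_aux (n : Int) (h : 0 ≤ n) : sumprod n = sumprod_alt n := by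
  obtain ⟨m, rfl⟩ := Int.eq_ofNat_of_zero_le h
  unfold sumprod sumprod_alt
  rw [sumprod_nat m]
  simp

-- ===== VERDICT (by name: the statement is the Claim_ definition above) =====
theorem sumprod_spec : Claim_equal_sumprod := by
  intro n _ hp
  exact sumprod_spec_aux n hp
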